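-- pv_equiv track=rewrite | github.com/nyu058/searchEngine | indexing/indexer.py | parseIndex
-- ===== SOURCE A (Python) =====
-- def parseIndex(dictionary):
--     index = []
--     for key in dictionary:
--         for term in dictionary[key]:
--             pos = len(index)
--             for i in range(len(index)):
--                 if index[i][0] > term:
--                     pos = i
--                     break
--             index.insert(pos, (term, key))
--
--     return index
-- ===== SOURCE B (Python) =====
-- def parseIndex(dictionary):
--     buckets = {}
--     for key in dictionary:
--         for term in dictionary[key]:
--             buckets.setdefault(term, []).append(key)
--     index = []
--     for term in sorted(buckets):
--         for key in buckets[term]: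
--             index.append((term, key))
--     return index
-- ===== Notes on version B (the rewrite author's own statement) =====
-- stated objective: faster
-- what changed: A repeatedly scans the growing result list and inserts each (term, key) pair in place (an insertion sort over all pairs); B builds a term->keys bucket dict in one pass, sorts only the distinct terms, and emits the groups in order.
import Mathlib
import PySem

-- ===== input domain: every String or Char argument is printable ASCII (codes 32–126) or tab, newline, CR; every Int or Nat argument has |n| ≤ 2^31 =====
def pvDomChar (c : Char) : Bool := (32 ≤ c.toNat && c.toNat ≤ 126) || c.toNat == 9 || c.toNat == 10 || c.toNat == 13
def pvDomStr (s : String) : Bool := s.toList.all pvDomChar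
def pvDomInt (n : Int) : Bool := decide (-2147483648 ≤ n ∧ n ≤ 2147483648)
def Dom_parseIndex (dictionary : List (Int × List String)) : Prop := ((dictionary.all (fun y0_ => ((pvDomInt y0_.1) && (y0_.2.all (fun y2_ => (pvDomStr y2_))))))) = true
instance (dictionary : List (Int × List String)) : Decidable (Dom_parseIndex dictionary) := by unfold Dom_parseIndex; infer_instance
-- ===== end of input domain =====

-- B replaces A's quadratic scan-and-insert insertion sort by a group-by dict plus a sort of the
-- distinct terms only (objective: faster; same return value, A mutates nothing observable).

-- ===== PORT A =====
-- the 'pos = len(index); for i in range(len(index)): if index[i][0] > term: pos = i; break' scan,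
-- as the obvious structural recursion with the same early stop
def pvPosScanA (term : String) : List (String × Int) → Nat
  | [] => 0
  | y :: rest => if y.1 > term then 0 else pvPosScanA term rest + 1

-- 'for key in dictionary: for term in dictionary[key]:' iterates the items in insertion order
def parseIndex (dictionary : List (Int × List String)) : List (String × Int) :=
  dictionary.foldl (fun index kv =>
    kv.2.foldl (fun index term =>
      PySem.List.insert index ((pvPosScanA term index : Nat) : Int) (term, kv.1)) index) []

-- ===== PORT B =====
-- buckets.setdefault(term, []).append(key)  ==  buckets[term] = buckets.get(term, []) + [key]
def parseIndex_alt (dictionary : List (Int × List String)) : List (String × Int) :=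
  let buckets : PySem.Dict String (List Int) :=
    dictionary.foldl (fun b kv =>
      kv.2.foldl (fun b term => b.insert term (b.getD term [] ++ [kv.1])) b) PySem.Dict.empty
  (PySem.List.sorted buckets.keys (fun x => x) false).foldl (fun index term =>
    (buckets.getD term []).foldl (fun index key => index ++ [(term, key)]) index) []

-- ===== PRECONDITION & SPEC =====
def Spec_parseIndex (dictionary : List (Int × List String)) (out : List (String × Int)) : Prop := out = parseIndex_alt dictionary
instance (dictionary : List (Int × List String)) (out : List (String × Int)) : Decidable (Spec_parseIndex dictionary out) := by unfold Spec_parseIndex; infer_instance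

-- ===== CLAIM (what is proved, stated in full; the proofs are below) =====
def Claim_equal_parseIndex : Prop := ∀ (dictionary : List (Int × List String)), Dom_parseIndex dictionary → Spec_parseIndex dictionary (parseIndex dictionary)

-- ===== LEMMAS AND PROOFS =====

-- the flattened stream of (term, key) pairs both loop nests traverse
def pvPairs (d : List (Int × List String)) : List (String × Int) :=
  d.flatMap (fun kv => kv.2.map (fun t => (t, kv.1)))

-- grouped emission: for each term t of ts, the pairs with fst = t in original order
def pvG (ts : List String) (xs : List (String × Int)) : List (String × Int) :=
  ts.flatMap (fun t => xs.filter (fun q => q.1 == t))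

-- a nested fold over the dictionary is a fold over the pair stream
theorem pv_foldl_pairs {β : Type} (g : β → (String × Int) → β) :
    ∀ (d : List (Int × List String)) (init : β),
      d.foldl (fun acc kv => kv.2.foldl (fun acc t => g acc (t, kv.1)) acc) init
        = (pvPairs d).foldl g init := by
  intro d
  induction d with
  | nil => intro init; simp [pvPairs]
  | cons kv rest ih =>
    intro init
    simp [pvPairs, List.foldl_append, List.foldl_map] at *
    rw [ih]

theorem pvPosScanA_le (t : String) (l : List (String × Int)) : pvPosScanA t l ≤ l.length := by
  induction l with
  | nil => simp [pvPosScanA]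
  | cons y r ih => simp [pvPosScanA]; split <;> omega

-- A's scan + list.insert is exactly insertion before the first strictly larger term
theorem pv_insert_eq_insertBy (t : String) (k : Int) (l : List (String × Int)) :
    PySem.List.insert l ((pvPosScanA t l : Nat) : Int) (t, k)
      = PySem.List.insertBy (fun a b => decide (a.1 < b.1)) (t, k) l := by
  induction l with
  | nil => simp [pvPosScanA, PySem.List.insert_zero, PySem.List.insertBy]
  | cons y r ih =>
    by_cases h : t < y.1
    · simp [pvPosScanA, h, PySem.List.insert_zero, PySem.List.insertBy]
    · have hle := pvPosScanA_le t r
      have h1 : pvPosScanA t (y :: r) = pvPosScanA t r + 1 := by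
        have : ¬ (y.1 > t) := h
        simp [pvPosScanA, this]
      rw [h1]
      rw [PySem.List.insert_natCast _ _ _ (by simpa using hle)]
      rw [PySem.List.insert_natCast _ _ _ hle] at ih
      simp only [List.take_succ_cons, List.drop_succ_cons]
      simp only [PySem.List.insertBy, h, decide_eq_true_eq]
      simpa using ih

theorem pv_parseIndex_eq_sorted (d : List (Int × List String)) :
    parseIndex d = PySem.List.sorted (pvPairs d) Prod.fst false := by
  unfold parseIndex
  have hcong : ∀ (index : List (String × Int)) (kv : Int × List String),
      kv.2.foldl (fun index term =>
        PySem.List.insert index ((pvPosScanA term index : Nat) : Int) (term, kv.1)) index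
      = kv.2.foldl (fun index term =>
        PySem.List.insertBy (fun a b => decide (a.1 < b.1)) (term, kv.1) index) index := by
    intro index kv
    exact PySem.List.foldl_congr_mem _ _ _ _ (fun acc t _ => pv_insert_eq_insertBy t kv.1 acc)
  calc
    d.foldl (fun index kv =>
        kv.2.foldl (fun index term =>
          PySem.List.insert index ((pvPosScanA term index : Nat) : Int) (term, kv.1)) index) []
        = d.foldl (fun index kv =>
            kv.2.foldl (fun index term =>
              PySem.List.insertBy (fun a b => decide (a.1 < b.1)) (term, kv.1) index) index) [] := by
          exact PySem.List.foldl_congr_mem _ _ _ _ (fun acc kv _ => hcong acc kv)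
    _ = (pvPairs d).foldl
          (fun acc q => PySem.List.insertBy (fun a b => decide (a.1 < b.1)) q acc) [] :=
          pv_foldl_pairs (fun acc q => PySem.List.insertBy (fun a b => decide (a.1 < b.1)) q acc) d []
    _ = PySem.List.sorted (pvPairs d) Prod.fst false :=
          (PySem.List.sorted_eq_foldl_insertBy (pvPairs d) Prod.fst).symm

theorem pvG_cons (t : String) (ts : List String) (ys : List (String × Int)) :
    pvG (t :: ts) ys = ys.filter (fun q => q.1 == t) ++ pvG ts ys := by
  simp [pvG]

theorem pv_mem_pvG_fst (ts : List String) (ys : List (String × Int)) (y : String × Int)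
    (h : y ∈ pvG ts ys) : y.1 ∈ ts := by
  simp only [pvG, List.mem_flatMap, List.mem_filter, beq_iff_eq] at h
  obtain ⟨t, ht, _, he⟩ := h
  rw [he]; exact ht

theorem pv_filter_append_pair (ys : List (String × Int)) (p : String × Int) (t : String) :
    (ys ++ [p]).filter (fun q => q.1 == t) =
      ys.filter (fun q => q.1 == t) ++ (if p.1 == t then [p] else []) := by
  rw [List.filter_append]
  by_cases h : p.1 = t <;> simp [h]

theorem pvG_append_not (ts : List String) (ys : List (String × Int)) (p : String × Int)
    (h : p.1 ∉ ts) : pvG ts (ys ++ [p]) = pvG ts ys := by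
  induction ts with
  | nil => rfl
  | cons t ts ih =>
    rw [pvG_cons, pvG_cons, pv_filter_append_pair, ih (by simp at h; exact h.2)]
    have hne : ¬ (p.1 = t) := by simp at h; exact fun e => h.1 e
    simp [hne]

theorem pv_insertBy_all_before {α : Type} (before : α → α → Bool) (x : α) (l : List α)
    (h : ∀ y ∈ l, before x y = true) : PySem.List.insertBy before x l = x :: l := by
  cases l with
  | nil => rfl
  | cons y r => simp [PySem.List.insertBy, h y (by simp)]

theorem pv_insertBy_append_not {α : Type} (before : α → α → Bool) (x : α) (w z : List α)
    (h : ∀ y ∈ w, before x y = false) :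
    PySem.List.insertBy before x (w ++ z) = w ++ PySem.List.insertBy before x z := by
  induction w with
  | nil => simp
  | cons y r ih =>
    simp only [List.cons_append, PySem.List.insertBy, h y (by simp)]
    simp only [Bool.false_eq_true, if_false]
    rw [ih (fun y hy => h y (by simp [hy]))]

theorem pv_fst_of_mem_filter (ys : List (String × Int)) (t : String) (y : String × Int)
    (h : y ∈ ys.filter (fun q => q.1 == t)) : y.1 = t := by
  have := List.of_mem_filter h
  simpa using this

-- L1: inserting a pair whose term already occurs lands at the end of its group
theorem pv_insert_grouped_mem (ts : List String) (ys : List (String × Int)) (p : String × Int)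
    (hs : ts.Pairwise (· < ·)) (hmem : p.1 ∈ ts) :
    PySem.List.insertBy (fun a b => decide (a.1 < b.1)) p (pvG ts ys) = pvG ts (ys ++ [p]) := by
  induction ts generalizing ys with
  | nil => simp at hmem
  | cons t ts ih =>
    have hlt : ∀ t' ∈ ts, t < t' := (List.pairwise_cons.mp hs).1
    have hs' : ts.Pairwise (· < ·) := (List.pairwise_cons.mp hs).2
    rw [pvG_cons, pvG_cons, pv_filter_append_pair]
    by_cases heq : p.1 = t
    · -- p joins the existing group t: skip the group, land in front of the rest
      rw [pv_insertBy_append_not _ _ _ _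
          (fun y hy => by simp [pv_fst_of_mem_filter ys t y hy, heq])]
      rw [pv_insertBy_all_before _ _ _
          (fun y hy => by
            have := pv_mem_pvG_fst ts ys y hy
            simp [heq, hlt _ this])]
      rw [pvG_append_not ts ys p (by rw [heq]; exact fun hc => (hlt t hc).false)]
      simp [heq]
    · have hmem' : p.1 ∈ ts := by cases hmem with
        | head => exact absurd rfl heq
        | tail _ h => exact h
      have htp : t < p.1 := hlt _ hmem'
      rw [pv_insertBy_append_not _ _ _ _
          (fun y hy => by
            simp [pv_fst_of_mem_filter ys t y hy, not_lt.mpr (le_of_lt htp)])]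
      rw [ih ys hs' hmem']
      simp [heq]

-- L2: a pair with a fresh term opens a new singleton group at the term's sorted position
theorem pv_insert_grouped_new (ts : List String) (ys : List (String × Int)) (p : String × Int)
    (hs : ts.Pairwise (· < ·)) (hmem : p.1 ∉ ts) (hno : ∀ q ∈ ys, q.1 ≠ p.1) :
    PySem.List.insertBy (fun a b => decide (a.1 < b.1)) p (pvG ts ys)
      = pvG (PySem.List.insertBy (fun a b => decide (a < b)) p.1 ts) (ys ++ [p]) := by
  have hfil : ys.filter (fun q => q.1 == p.1) = [] :=
    List.filter_eq_nil_iff.mpr (fun q hq => by simp [hno q hq])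
  induction ts generalizing ys with
  | nil =>
    simp [pvG, PySem.List.insertBy, hfil]
  | cons t ts ih =>
    have hlt : ∀ t' ∈ ts, t < t' := (List.pairwise_cons.mp hs).1
    have hs' : ts.Pairwise (· < ·) := (List.pairwise_cons.mp hs).2
    have hne : p.1 ≠ t := by intro e; exact hmem (e ▸ List.mem_cons_self)
    have hmem' : p.1 ∉ ts := fun hc => hmem (List.mem_cons_of_mem _ hc)
    by_cases hplt : p.1 < t
    · -- new first group [p] in front of everything
      have h1 : PySem.List.insertBy (fun a b => decide (a < b)) p.1 (t :: ts) = p.1 :: t :: ts := by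
        simp [PySem.List.insertBy, hplt]
      rw [h1, pv_insertBy_all_before _ _ _
          (fun y hy => by
            have := pv_mem_pvG_fst (t :: ts) ys y hy
            cases this with
            | head => simp [hplt]
            | tail _ h => simp [lt_trans hplt (hlt _ h)])]
      rw [pvG_cons p.1, pv_filter_append_pair, hfil,
          pvG_append_not (t :: ts) ys p hmem]
      simp
    · have htp : t < p.1 := lt_of_le_of_ne (not_lt.mp hplt) (fun e => hne e.symm)
      have h1 : PySem.List.insertBy (fun a b => decide (a < b)) p.1 (t :: ts)
          = t :: PySem.List.insertBy (fun a b => decide (a < b)) p.1 ts := by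
        simp [PySem.List.insertBy, not_lt.mpr (le_of_lt htp)]
      rw [h1, pvG_cons, pvG_cons, pv_filter_append_pair,
          pv_insertBy_append_not _ _ _ _
            (fun y hy => by
              simp [pv_fst_of_mem_filter ys t y hy, not_lt.mpr (le_of_lt htp)]),
          ih ys hs' hmem' hno hfil]
      simp [hne]

-- the stable sort by fst is the grouped emission over the sorted distinct terms
theorem pv_set_add_mem {α : Type} [BEq α] [LawfulBEq α] (s : PySem.Set α) (a : α) (h : a ∈ s) :
    PySem.Set.add s a = s := by
  simp [PySem.Set.add, PySem.Set.contains]; exact h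

theorem pv_set_add_not_mem {α : Type} [BEq α] [LawfulBEq α] (s : PySem.Set α) (a : α) (h : a ∉ s) :
    PySem.Set.add s a = s ++ [a] := by
  simp [PySem.Set.add, PySem.Set.contains, h]

theorem pv_sorted_grouped (xs : List (String × Int)) :
    PySem.List.sorted xs Prod.fst false
      = pvG (PySem.List.sorted (PySem.Set.ofList (xs.map Prod.fst)) (fun x => x) false) xs := by
  induction xs using List.reverseRecOn with
  | nil => simp [pvG, PySem.List.sorted, PySem.Set.ofList]
  | append_singleton ys p ih =>
    have hsa : PySem.List.sorted (ys ++ [p]) Prod.fst false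
        = PySem.List.insertBy (fun a b => decide (a.1 < b.1)) p (PySem.List.sorted ys Prod.fst false) := by
      rw [PySem.List.sorted_eq_foldl_insertBy, PySem.List.sorted_eq_foldl_insertBy, List.foldl_append]
      simp
    have hofl : PySem.Set.ofList ((ys ++ [p]).map Prod.fst)
        = PySem.Set.add (PySem.Set.ofList (ys.map Prod.fst)) p.1 := by
      rw [List.map_append, PySem.Set.ofList_eq_foldl, PySem.Set.ofList_eq_foldl, List.foldl_append]
      simp
    have hpair : (PySem.List.sorted (PySem.Set.ofList (ys.map Prod.fst)) (fun x => x) false).Pairwise (· < ·) :=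
      PySem.List.sorted_ofList_pairwise_lt _
    by_cases hp : p.1 ∈ ys.map Prod.fst
    · rw [hsa, ih, hofl, pv_set_add_mem _ _ ((PySem.Set.mem_ofList _ _).mpr hp)]
      exact pv_insert_grouped_mem _ ys p hpair
        (by rw [PySem.List.mem_sorted]; exact (PySem.Set.mem_ofList _ _).mpr hp)
    · rw [hsa, ih, hofl, pv_set_add_not_mem _ _ (fun hc => hp ((PySem.Set.mem_ofList _ _).mp hc))]
      have hsid : PySem.List.sorted (PySem.Set.ofList (ys.map Prod.fst) ++ [p.1]) (fun x => x) false
          = PySem.List.insertBy (fun a b => decide (a < b)) p.1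
              (PySem.List.sorted (PySem.Set.ofList (ys.map Prod.fst)) (fun x => x) false) := by
        rw [PySem.List.sorted_eq_foldl_insertBy, PySem.List.sorted_eq_foldl_insertBy, List.foldl_append]
        simp
      rw [hsid]
      exact pv_insert_grouped_new _ ys p hpair
        (by rw [PySem.List.mem_sorted]; exact fun hc => hp ((PySem.Set.mem_ofList _ _).mp hc))
        (fun q hq he => hp (he ▸ List.mem_map_of_mem hq))

-- B's bucket dict: keys are the distinct terms in first-appearance order,
-- each bucket is the key stream of its term
def pvStep (b : PySem.Dict String (List Int)) (q : String × Int) : PySem.Dict String (List Int) :=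
  b.insert q.1 (b.getD q.1 [] ++ [q.2])

theorem pv_bucket_spec (ps : List (String × Int)) :
    (ps.foldl pvStep PySem.Dict.empty).keys = PySem.Set.ofList (ps.map Prod.fst)
    ∧ ∀ t : String, (ps.foldl pvStep PySem.Dict.empty).getD t []
        = (ps.filter (fun q => q.1 == t)).map Prod.snd := by
  induction ps using List.reverseRecOn with
  | nil =>
    constructor
    · rfl
    · intro t; rfl
  | append_singleton ps q ih =>
    obtain ⟨ihk, ihg⟩ := ih
    rw [List.foldl_append]
    simp only [List.foldl_cons, List.foldl_nil]
    set b := ps.foldl pvStep PySem.Dict.empty with hb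
    have hofl : PySem.Set.ofList ((ps ++ [q]).map Prod.fst)
        = PySem.Set.add (PySem.Set.ofList (ps.map Prod.fst)) q.1 := by
      rw [List.map_append, PySem.Set.ofList_eq_foldl, PySem.Set.ofList_eq_foldl, List.foldl_append]
      simp
    constructor
    · by_cases hc : b.contains q.1 = true
      · rw [pvStep, PySem.Dict.keys_insert_of_contains _ _ hc, ihk, hofl,
            pv_set_add_mem]
        rw [← ihk]
        exact (PySem.Dict.contains_iff_mem_keys _ _).mp hc
      · rw [pvStep, PySem.Dict.keys_insert_of_not_contains _ _ (by simpa using hc), ihk, hofl,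
            pv_set_add_not_mem]
        rw [← ihk]
        exact fun hm => hc ((PySem.Dict.contains_iff_mem_keys _ _).mpr hm)
    · intro t
      by_cases ht : t = q.1
      · subst ht
        rw [pvStep, PySem.Dict.getD_insert_self, ihg, pv_filter_append_pair]
        simp
      · rw [pvStep, PySem.Dict.getD_insert_of_ne _ _ _ ht, ihg, pv_filter_append_pair]
        have hne : ¬ (q.1 = t) := fun e => ht e.symm
        simp [hne]

theorem pv_parseIndex_alt_eq_grouped (d : List (Int × List String)) :
    parseIndex_alt d
      = pvG (PySem.List.sorted (PySem.Set.ofList ((pvPairs d).map Prod.fst)) (fun x => x) false)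
            (pvPairs d) := by
  show (let buckets : PySem.Dict String (List Int) := d.foldl (fun b kv => kv.2.foldl (fun b term => b.insert term (b.getD term [] ++ [kv.1])) b) PySem.Dict.empty; (PySem.List.sorted buckets.keys (fun x => x) false).foldl (fun index term => (buckets.getD term []).foldl (fun index key => index ++ [(term, key)]) index) []) = _
  simp only []
  have hb : d.foldl (fun b kv =>
      kv.2.foldl (fun b term => b.insert term (b.getD term [] ++ [kv.1])) b) PySem.Dict.empty
      = (pvPairs d).foldl pvStep PySem.Dict.empty :=
    pv_foldl_pairs pvStep d PySem.Dict.empty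
  rw [hb]
  obtain ⟨hk, hg⟩ := pv_bucket_spec (pvPairs d)
  rw [hk]
  have hinner : ∀ (index : List (String × Int)) (term : String),
      (((pvPairs d).foldl pvStep PySem.Dict.empty).getD term []).foldl
        (fun index key => index ++ [(term, key)]) index
      = index ++ (pvPairs d).filter (fun q => q.1 == term) := by
    intro index term
    rw [PySem.List.foldl_append_singleton_eq_map (fun key => (term, key)), hg]
    congr 1
    rw [List.map_map]
    calc ((pvPairs d).filter (fun q => q.1 == term)).map ((fun k => (term, k)) ∘ Prod.snd)
        = ((pvPairs d).filter (fun q => q.1 == term)).map id := by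
          apply List.map_congr_left
          intro q hq
          have : q.1 = term := by simpa using (List.of_mem_filter hq)
          simp [← this]
      _ = (pvPairs d).filter (fun q => q.1 == term) := List.map_id _
  rw [PySem.List.foldl_congr_mem _ _
        (fun index term => index ++ (pvPairs d).filter (fun q => q.1 == term)) _
        (fun acc t _ => hinner acc t)]
  rw [PySem.List.foldl_append_eq_flatMap]
  simp [pvG]

-- ===== VERDICT (by name: the statement is the Claim_ definition above) =====
theorem parseIndex_spec : Claim_equal_parseIndex := by
  intro d _
  unfold Spec_parseIndex
  rw [pv_parseIndex_eq_sorted, pv_parseIndex_alt_eq_grouped, pv_sorted_grouped]
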